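-- pv_equiv track=rewrite | github.com/inter-binsim/inter-binsim | GraphEmb/inter-binsim/inter_data.py | features_stas
-- ===== SOURCE A (Python) =====
-- class Solution:
--     def __init__(self):
--         self.count = 0
--
--     def MergeSort(self, arr):
--         if len(arr) <= 1:
--             return arr
--         mid = int(len(arr)/2)
--         left = self.MergeSort(arr[:mid])
--         right = self.MergeSort(arr[mid:])
--         l,r = 0,0
--         res = []
--         while l<len(left) and r<len(right):
--             if left[l] <= right[r]:
--                 res.append(left[l])
--                 l += 1
--             elif right[r] < left[l]:
--                 res.append(right[r])
--                 self.count += (len(left) - l)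
--                 r += 1
--         res += left[l:]
--         res += right[r:]
--         return res
--
--     def InversePairs(self, data):
--         # write code here
--         self.MergeSort(data)
--         return self.count%1000000007
--
-- def features_stas(ins, cfg, ins_v):
--     n_call=0# count number of call
--     calls = ['call', 'jal', 'jalr']
--
--     n_trans=0# count number of transfer
--     trans = ['jmp', 'jz', 'jnz', 'js', 'je', 'jne', 'jg', 'jle', 'jge', 'ja', 'jnc', 'call']
--
--     n_logic = 0 # count number of logic
--     logic = {'add', 'sub', 'div', 'imul', 'idiv', 'mul', 'shl', 'dec', 'inc'}
--
--     n_others = 0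
--     for i in ins:
--         t = i[2:]
--         pos = t.find('_')
--         opc = t[:pos]
--         if opc in calls:
--             n_call+=1
--         elif opc in trans:
--             n_trans+=1
--         elif opc in logic:
--             n_logic+=1
--         else:
--             n_others+=1
--     s = Solution() #cal the num of reverse pairs
--     n_r = s.InversePairs(ins_v)
--     return [n_call, n_trans, n_logic, n_others, n_r]
-- ===== SOURCE B (Python) =====
-- def features_stas(ins, cfg, ins_v):
--     calls = ['call', 'jal', 'jalr']
--     trans = ['jmp', 'jz', 'jnz', 'js', 'je', 'jne', 'jg', 'jle', 'jge', 'ja', 'jnc', 'call']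
--     logic = {'add', 'sub', 'div', 'imul', 'idiv', 'mul', 'shl', 'dec', 'inc'}
--
--     def cat(i):
--         t = i[2:]
--         opc = t[:t.find('_')]
--         if opc in calls:
--             return 0
--         if opc in trans:
--             return 1
--         if opc in logic:
--             return 2
--         return 3
--
--     cats = [cat(i) for i in ins]
--
--     # strict inversions: pairs idx < jdx with ins_v[idx] > ins_v[jdx]
--     inv = 0
--     for idx in range(len(ins_v)):
--         x = ins_v[idx]
--         for y in ins_v[idx + 1:]:
--             if y < x:
--                 inv += 1
--
--     return [cats.count(0), cats.count(1), cats.count(2), cats.count(3),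
--             inv % 1000000007]
-- ===== Notes on version B (the rewrite author's own statement) =====
-- stated objective: simpler
-- what changed: Replaces the Solution class with its stateful recursive merge-sort inversion counter by a direct two-loop count of strict inversion pairs, and the four running counters by a category function plus list.count.
import Mathlib
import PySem

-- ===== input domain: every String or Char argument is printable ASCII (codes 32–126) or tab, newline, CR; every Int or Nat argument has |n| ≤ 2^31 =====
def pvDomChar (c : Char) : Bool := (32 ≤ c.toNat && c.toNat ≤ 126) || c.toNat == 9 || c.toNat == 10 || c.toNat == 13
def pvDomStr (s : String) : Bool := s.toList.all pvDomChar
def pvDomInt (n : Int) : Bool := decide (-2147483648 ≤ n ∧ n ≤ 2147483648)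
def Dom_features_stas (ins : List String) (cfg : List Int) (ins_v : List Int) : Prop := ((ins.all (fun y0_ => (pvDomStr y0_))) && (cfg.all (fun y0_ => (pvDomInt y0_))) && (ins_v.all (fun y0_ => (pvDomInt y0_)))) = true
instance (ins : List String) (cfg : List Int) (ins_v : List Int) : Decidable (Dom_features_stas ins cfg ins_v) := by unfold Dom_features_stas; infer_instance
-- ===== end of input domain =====

-- B replaces A's stateful merge-sort inversion counter by a direct strict-pair count (simpler, not faster).

-- constants and per-instruction opcode extraction, code identical in Source A and Source B:
-- t = i[2:]; pos = t.find('_'); opc = t[:pos]   (pos may be -1: then opc = t minus its last char)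
def pvCalls : List String := ["call", "jal", "jalr"]
def pvTrans : List String := ["jmp", "jz", "jnz", "js", "je", "jne", "jg", "jle", "jge", "ja", "jnc", "call"]
def pvLogic : List String := ["add", "sub", "div", "imul", "idiv", "mul", "shl", "dec", "inc"]
def pvOpc (i : String) : String :=
  let t := PySem.Str.slice i (some 2) none
  let pos := PySem.Str.find t "_"
  PySem.Str.slice t none (some pos)

-- ===== PORT A =====
-- the while-loop of Solution.MergeSort: res built front to back, self.count grows by (len(left) - l);
-- on ints the 'elif right[r] < left[l]' is exactly the negation of 'left[l] <= right[r]'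
def pvMerge : List Int → List Int → List Int × Int
  | [], right => (right, 0)
  | left, [] => (left, 0)
  | a :: ls, b :: rs =>
    if a ≤ b then
      let p := pvMerge ls (b :: rs)
      (a :: p.1, p.2)
    else
      let p := pvMerge (a :: ls) rs
      (b :: p.1, p.2 + ((ls.length : Int) + 1))

-- Solution.MergeSort with self.count threaded as the second component.
-- mid = int(len(arr)/2): float division is exact for any list length below 2^52, so this is Nat halving.
def pvMergeSort (arr : List Int) : List Int × Int :=
  if _h : arr.length ≤ 1 then (arr, 0)
  else
    let mid := arr.length / 2
    let pl := pvMergeSort (arr.take mid)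
    let pr := pvMergeSort (arr.drop mid)
    let pm := pvMerge pl.1 pr.1
    (pm.1, pl.2 + pr.2 + pm.2)
termination_by arr.length
decreasing_by
  · simp only [List.length_take]; omega
  · simp only [List.length_drop]; omega

def features_stas (ins : List String) (cfg : List Int) (ins_v : List Int) : List Int :=
  let counts := ins.foldl (fun (s : Int × Int × Int × Int) i =>
    let opc := pvOpc i
    if pvCalls.contains opc then (s.1 + 1, s.2.1, s.2.2.1, s.2.2.2)
    else if pvTrans.contains opc then (s.1, s.2.1 + 1, s.2.2.1, s.2.2.2)
    else if pvLogic.contains opc then (s.1, s.2.1, s.2.2.1 + 1, s.2.2.2)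
    else (s.1, s.2.1, s.2.2.1, s.2.2.2 + 1)) (0, 0, 0, 0)
  -- s.InversePairs(ins_v) = MergeSort count % 1000000007 (count ≥ 0, Python % = emod here)
  let n_r := PySem.Int.mod (pvMergeSort ins_v).2 1000000007
  [counts.1, counts.2.1, counts.2.2.1, counts.2.2.2, n_r]

-- ===== PORT B =====
-- Source B's cat(i): the category index 0..3
def pvCat (i : String) : Nat :=
  let opc := pvOpc i
  if pvCalls.contains opc then 0
  else if pvTrans.contains opc then 1
  else if pvLogic.contains opc then 2
  else 3

-- Source B's inv pass: for each idx, count the later elements strictly smaller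
def pvInv : List Int → Int
  | [] => 0
  | x :: xs => ((xs.countP (fun y => decide (y < x)) : Nat) : Int) + pvInv xs

def features_stas_alt (ins : List String) (cfg : List Int) (ins_v : List Int) : List Int :=
  let cats := ins.map pvCat
  [((cats.count 0 : Nat) : Int), ((cats.count 1 : Nat) : Int),
   ((cats.count 2 : Nat) : Int), ((cats.count 3 : Nat) : Int),
   PySem.Int.mod (pvInv ins_v) 1000000007]

-- ===== PRECONDITION & SPEC =====
def Spec_features_stas (ins : List String) (cfg : List Int) (ins_v : List Int) (out : List Int) : Prop := out = features_stas_alt ins cfg ins_v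
instance (ins : List String) (cfg : List Int) (ins_v : List Int) (out : List Int) : Decidable (Spec_features_stas ins cfg ins_v out) := by unfold Spec_features_stas; infer_instance

-- ===== CLAIM (what is proved, stated in full; the proofs are below) =====
def Claim_equal_features_stas : Prop := ∀ (ins : List String) (cfg : List Int) (ins_v : List Int), Dom_features_stas ins cfg ins_v → Spec_features_stas ins cfg ins_v (features_stas ins cfg ins_v)

-- ===== LEMMAS AND PROOFS =====

-- number of pairs (a ∈ l, b ∈ r) with b < a
def pvCross (l r : List Int) : Int :=
  (l.map (fun a => ((r.countP (fun b => decide (b < a)) : Nat) : Int))).sum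

theorem pvCross_cons_left (a : Int) (l r : List Int) :
    pvCross (a :: l) r = ((r.countP (fun b => decide (b < a)) : Nat) : Int) + pvCross l r := by
  simp [pvCross]

theorem pvCross_cons_right (l : List Int) (b : Int) (r : List Int) :
    pvCross l (b :: r) = ((l.countP (fun a => decide (b < a)) : Nat) : Int) + pvCross l r := by
  induction l with
  | nil => simp [pvCross]
  | cons a l ih =>
    simp only [pvCross_cons_left, List.countP_cons] at *
    rw [ih]
    by_cases h : b < a <;> simp [h] <;> ring

theorem pvCross_perm_left {l l' : List Int} (h : l.Perm l') (r : List Int) :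
    pvCross l r = pvCross l' r := by
  unfold pvCross
  exact List.Perm.sum_eq (List.Perm.map _ h)

theorem pvCross_perm_right (l : List Int) {r r' : List Int} (h : r.Perm r') :
    pvCross l r = pvCross l r' := by
  unfold pvCross
  congr 1
  exact List.map_congr_left (fun a _ => by rw [List.Perm.countP_eq _ h])

theorem pvMerge_perm (l r : List Int) : (pvMerge l r).1.Perm (l ++ r) := by
  fun_induction pvMerge l r with
  | case1 r => simp
  | case2 l h => simp
  | case3 a ls b rs hle p ih => exact ih.cons a
  | case4 a ls b rs hle p ih => exact (ih.cons b).trans List.perm_middle.symm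

theorem pvMerge_sorted (l r : List Int) (hl : l.Pairwise (· ≤ ·)) (hr : r.Pairwise (· ≤ ·)) :
    (pvMerge l r).1.Pairwise (· ≤ ·) := by
  fun_induction pvMerge l r with
  | case1 r => exact hr
  | case2 l h => exact hl
  | case3 a ls b rs hle p ih =>
    rw [List.pairwise_cons] at hl
    refine List.pairwise_cons.mpr ⟨?_, ih hl.2 hr⟩
    intro x hx
    have hx' : x ∈ ls ++ b :: rs := (pvMerge_perm ls (b :: rs)).mem_iff.mp hx
    rcases List.mem_append.mp hx' with h1 | h1
    · exact hl.1 x h1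
    · rcases List.mem_cons.mp h1 with rfl | h2
      · exact hle
      · exact le_trans hle ((List.pairwise_cons.mp hr).1 x h2)
  | case4 a ls b rs hle p ih =>
    rw [List.pairwise_cons] at hr
    refine List.pairwise_cons.mpr ⟨?_, ih hl hr.2⟩
    intro x hx
    have hx' : x ∈ a :: ls ++ rs := (pvMerge_perm (a :: ls) rs).mem_iff.mp hx
    have hba : b ≤ a := le_of_lt (lt_of_not_ge hle)
    rcases List.mem_cons.mp hx' with rfl | h1
    · exact hba
    · rcases List.mem_append.mp h1 with h2 | h2
      · exact le_trans hba ((List.pairwise_cons.mp hl).1 x h2)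
      · exact hr.1 x h2

theorem pvMerge_count (l r : List Int) (hl : l.Pairwise (· ≤ ·)) (hr : r.Pairwise (· ≤ ·)) :
    (pvMerge l r).2 = pvCross l r := by
  fun_induction pvMerge l r with
  | case1 r => simp [pvCross]
  | case2 l h => simp [pvCross]
  | case3 a ls b rs hle p ih =>
    show (pvMerge ls (b :: rs)).2 = _
    rw [ih (List.pairwise_cons.mp hl).2 hr, pvCross_cons_left]
    have h0 : (b :: rs).countP (fun x => decide (x < a)) = 0 := by
      rw [List.countP_eq_zero]
      intro x hx
      rcases List.mem_cons.mp hx with rfl | h2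
      · simpa using not_lt_of_ge hle
      · have : b ≤ x := (List.pairwise_cons.mp hr).1 x h2
        simpa using not_lt_of_ge (le_trans hle this)
    rw [h0]; simp
  | case4 a ls b rs hle p ih =>
    show (pvMerge (a :: ls) rs).2 + ((ls.length : Int) + 1) = _
    rw [ih hl (List.pairwise_cons.mp hr).2, pvCross_cons_right]
    have hfull : (a :: ls).countP (fun x => decide (b < x)) = (a :: ls).length := by
      rw [List.countP_eq_length]
      intro x hx
      rcases List.mem_cons.mp hx with rfl | h2
      · simpa using lt_of_not_ge hle
      · have : a ≤ x := (List.pairwise_cons.mp hl).1 x h2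
        simpa using lt_of_lt_of_le (lt_of_not_ge hle) this
    rw [hfull]
    simp only [List.length_cons]
    push_cast
    ring

theorem pvInv_append (l r : List Int) :
    pvInv (l ++ r) = pvInv l + pvInv r + pvCross l r := by
  induction l with
  | nil => simp [pvInv, pvCross]
  | cons a l ih =>
    simp only [List.cons_append, pvInv, List.countP_append, ih, pvCross_cons_left]
    push_cast
    ring

theorem pvMergeSort_spec (arr : List Int) :
    (pvMergeSort arr).1.Perm arr ∧ (pvMergeSort arr).1.Pairwise (· ≤ ·) ∧
      (pvMergeSort arr).2 = pvInv arr := by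
  fun_induction pvMergeSort arr with
  | case1 arr h =>
    refine ⟨List.Perm.refl _, ?_, ?_⟩
    · match arr, h with
      | [], _ => exact List.Pairwise.nil
      | [x], _ => simp
    · match arr, h with
      | [], _ => simp [pvInv]
      | [x], _ => simp [pvInv]
  | case2 arr h mid pl pr pm ihl ihr =>
    obtain ⟨hpl, hsl, hcl⟩ := ihl
    obtain ⟨hpr, hsr, hcr⟩ := ihr
    have hperm : pm.1.Perm (arr.take mid ++ arr.drop mid) :=
      (pvMerge_perm pl.1 pr.1).trans (hpl.append hpr)
    refine ⟨?_, ?_, ?_⟩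
    · simpa [List.take_append_drop] using hperm
    · exact pvMerge_sorted pl.1 pr.1 hsl hsr
    · show pl.2 + pr.2 + pm.2 = pvInv arr
      rw [hcl, hcr]
      have : pm.2 = pvCross (arr.take mid) (arr.drop mid) := by
        show (pvMerge pl.1 pr.1).2 = _
        rw [pvMerge_count pl.1 pr.1 hsl hsr, pvCross_perm_left hpl, pvCross_perm_right _ hpr]
      rw [this, ← pvInv_append, List.take_append_drop]

theorem pvCounts_fold (ins : List String) (s : Int × Int × Int × Int) :
    ins.foldl (fun (s : Int × Int × Int × Int) i =>
      let opc := pvOpc i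
      if pvCalls.contains opc then (s.1 + 1, s.2.1, s.2.2.1, s.2.2.2)
      else if pvTrans.contains opc then (s.1, s.2.1 + 1, s.2.2.1, s.2.2.2)
      else if pvLogic.contains opc then (s.1, s.2.1, s.2.2.1 + 1, s.2.2.2)
      else (s.1, s.2.1, s.2.2.1, s.2.2.2 + 1)) s
    = (s.1 + (((ins.map pvCat).count 0 : Nat) : Int), s.2.1 + (((ins.map pvCat).count 1 : Nat) : Int),
       s.2.2.1 + (((ins.map pvCat).count 2 : Nat) : Int), s.2.2.2 + (((ins.map pvCat).count 3 : Nat) : Int)) := by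
  induction ins generalizing s with
  | nil => simp
  | cons i ins ih =>
    rw [List.foldl_cons, ih]
    simp only [List.map_cons, List.count_cons, pvCat]
    by_cases h1 : pvCalls.contains (pvOpc i)
    · simp only [h1, if_true]
      simp [Prod.ext_iff]
      omega
    · by_cases h2 : pvTrans.contains (pvOpc i)
      · simp only [h1, h2, if_true]
        simp [Prod.ext_iff]
        omega
      · by_cases h3 : pvLogic.contains (pvOpc i)
        · simp only [h1, h2, h3, if_true]
          simp [Prod.ext_iff]
          omega
        · simp only [h1, h2, h3]
          simp [Prod.ext_iff]
          omega

-- ===== VERDICT (by name: the statement is the Claim_ definition above) =====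
theorem features_stas_spec : Claim_equal_features_stas := by
  intro ins cfg ins_v _
  show features_stas ins cfg ins_v = features_stas_alt ins cfg ins_v
  simp only [features_stas, features_stas_alt]
  rw [pvCounts_fold, (pvMergeSort_spec ins_v).2.2]
  simp
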